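-- pv_equiv track=rewrite | github.com/ChipFlow/vajax | openvaf-py/openvaf_jax_old.py | _find_condition_for_pred_groups
-- ===== SOURCE A (Python) =====
-- from typing import Dict, List, Callable, Any, Tuple, Set, Optional, Union
--
-- def _find_condition_for_pred_groups(phi_block: str, preds_a: List[str],
--                                     preds_b: List[str], blocks: Dict,
--                                     branch_conds: Dict) -> Optional[str]:
--     """Find condition expression that is True when reaching preds_a, False for preds_b.
--
--     This handles complex CFG patterns like PSP103's channel current computation:
--     - Multiple paths (preds_a) lead to one value (e.g., 0 for no current)
--     - Single path (preds_b) leads to another value (e.g., actual current)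
--     - The condition is a conjunction of multiple branch conditions
--
--     Returns a condition expression string like "v969558 & v972835" or None if not found.
--     """
--     # Build reachability sets - which blocks can reach preds_a vs preds_b?
--     # A decision point is a block where one successor leads to preds_b
--     # and another leads to preds_a (or is on a path to preds_a).
--
--     # Build reachability from each phi predecessor
--     def get_all_predecessors(start_blocks: List[str], max_depth: int = 20) -> Set[str]:
--         """Get all blocks that can reach the start blocks."""
--         result = set(start_blocks)
--         frontier = list(start_blocks)
--         for _ in range(max_depth):
--             if not frontier:
--                 break
--             new_frontier = []
--             for block in frontier:
--                 for pred in blocks.get(block, {}).get('predecessors', []):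
--                     if pred not in result:
--                         result.add(pred)
--                         new_frontier.append(pred)
--             frontier = new_frontier
--         return result
--
--     # Blocks that can reach preds_a (the default value paths)
--     reaches_a = get_all_predecessors(preds_a)
--     # Blocks that can reach preds_b (the special value paths)
--     reaches_b = get_all_predecessors(preds_b)
--
--     # Find decision points: blocks that branch with one successor
--     # leading to preds_b and another leading to preds_a
--     conditions = []
--
--     for block_name in branch_conds:
--         succs = blocks.get(block_name, {}).get('successors', [])
--         if len(succs) != 2:
--             continue
--
--         succ0, succ1 = succs
--
--         # Check if this is a decision point between paths to a vs b
--         # We want blocks where one path leads ONLY to preds_b (or its chain)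
--         # and another path leads to preds_a
--
--         # Check both orderings
--         for target_succ, default_succ in [(succ0, succ1), (succ1, succ0)]:
--             # Does target_succ lead to preds_b?
--             target_reaches_b = (target_succ in reaches_b or target_succ in preds_b)
--             # Does default_succ lead to preds_a (but NOT to preds_b)?
--             default_reaches_a = (default_succ in reaches_a or default_succ in preds_a)
--             default_not_reaches_b = (default_succ not in reaches_b and default_succ not in preds_b)
--
--             if target_reaches_b and default_reaches_a and default_not_reaches_b:
--                 # This block is a decision point!
--                 cond_info = branch_conds[block_name].get(target_succ)
--                 if cond_info:
--                     cond_var, is_true = cond_info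
--                     if is_true:
--                         conditions.append(cond_var)
--                     else:
--                         conditions.append(f"(~{cond_var})")
--                 break  # Found the decision for this block
--
--     if conditions:
--         # Deduplicate and combine
--         unique_conds = list(dict.fromkeys(conditions))  # Preserve order, remove dups
--         if len(unique_conds) == 1:
--             return unique_conds[0]
--         else:
--             return f"({' & '.join(unique_conds)})"
--
--     return None
-- ===== SOURCE B (Python) =====
-- from typing import Dict, List, Optional
--
--
-- def _find_condition_for_pred_groups(phi_block: str, preds_a: List[str],
--                                     preds_b: List[str], blocks: Dict,
--                                     branch_conds: Dict) -> Optional[str]: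
--     """Find condition expression that is True when reaching preds_a, False for preds_b.
--
--     Same result as the frontier-BFS version, computed differently: bounded
--     reachability is a snapshot fixed point driven by a scan over the blocks
--     table (no per-node dict lookups), the per-block decision is a
--     target-successor picker over the two orderings, conditions are collected
--     from the dict items directly with inline first-occurrence dedup.
--     """
--     def closure(start):
--         # 20 snapshot rounds: add every predecessor listed by a block already
--         # in the set; after round k the set holds exactly the blocks at
--         # predecessor-distance <= k, as in the frontier BFS.
--         cur = set(start)
--         for _ in range(20):
--             new = set()
--             for name, info in blocks.items():
--                 if name in cur:
--                     new |= set(info.get('predecessors', [])) - cur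
--             if not new:
--                 break
--             cur |= new
--         return cur
--
--     # closure(start) contains start, so "in reaches_x or in preds_x" is one test
--     ra = closure(preds_a)
--     rb = closure(preds_b)
--
--     def pick(name, cmap):
--         # choose the successor whose branch leads to preds_b while the other
--         # one leads to preds_a only, then format its condition (or None)
--         succs = blocks.get(name, {}).get('successors', [])
--         if len(succs) != 2:
--             return None
--         s0, s1 = succs
--         def ok(t, d):
--             return t in rb and d in ra and d not in rb
--         tgt = s0 if ok(s0, s1) else s1 if ok(s1, s0) else None
--         info = cmap.get(tgt) if tgt is not None else None
--         if not info:
--             return None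
--         var, pos = info
--         return var if pos else f"(~{var})"
--
--     conds = []
--     for name, cmap in branch_conds.items():
--         c = pick(name, cmap)
--         if c is not None and c not in conds:
--             conds.append(c)
--     if not conds:
--         return None
--     return conds[0] if len(conds) == 1 else f"({' & '.join(conds)})"
-- ===== Notes on version B (the rewrite author's own statement) =====
-- stated objective: alternative
-- what changed: Reachability is a snapshot fixed point driven by a scan over the blocks table (each round scans blocks.items() and collects the predecessors listed by members, with no per-node dict lookups and no frontier), the redundant 'in reaches_x or in preds_x' pair of tests is fused into one membership in the closure, the per-block decision is an Option-returning target-successor picker iterating branch_conds.items() directly instead of keys plus re-lookup, and duplicates are dropped inline instead of a final dict.fromkeys pass; …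
import Mathlib
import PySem

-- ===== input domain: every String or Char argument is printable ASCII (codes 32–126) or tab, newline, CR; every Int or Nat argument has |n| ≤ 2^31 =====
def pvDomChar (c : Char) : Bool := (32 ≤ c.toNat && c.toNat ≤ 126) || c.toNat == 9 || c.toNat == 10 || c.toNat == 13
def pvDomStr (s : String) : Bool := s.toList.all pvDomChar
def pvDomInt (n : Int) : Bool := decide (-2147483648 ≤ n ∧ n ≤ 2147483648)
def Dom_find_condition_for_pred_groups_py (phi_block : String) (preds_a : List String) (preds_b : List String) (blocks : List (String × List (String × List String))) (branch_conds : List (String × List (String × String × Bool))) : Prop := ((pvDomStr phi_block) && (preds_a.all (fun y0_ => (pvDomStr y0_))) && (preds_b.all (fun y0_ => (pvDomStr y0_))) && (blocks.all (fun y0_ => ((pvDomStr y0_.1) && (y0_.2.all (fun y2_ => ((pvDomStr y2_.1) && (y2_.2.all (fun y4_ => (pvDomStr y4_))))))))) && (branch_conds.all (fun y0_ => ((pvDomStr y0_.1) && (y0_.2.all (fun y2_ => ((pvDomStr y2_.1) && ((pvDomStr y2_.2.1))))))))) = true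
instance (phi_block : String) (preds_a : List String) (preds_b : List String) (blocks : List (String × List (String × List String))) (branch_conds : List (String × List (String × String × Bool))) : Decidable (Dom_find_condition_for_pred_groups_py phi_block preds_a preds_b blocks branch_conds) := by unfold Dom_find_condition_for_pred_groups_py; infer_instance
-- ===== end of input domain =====

-- B replaces A's frontier-based BFS by a snapshot fixed point driven by a scan over the blocks
-- table, fuses the "in reaches_x or in preds_x" tests into one membership, picks the target
-- successor with an Option-valued helper over the dict items directly, and dedups inline
-- (objective: alternative decomposition, same result).

-- ===== PORT A =====
-- blocks.get(b, {}).get('predecessors', [])  (assoc-list lookup = Python dict lookup)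
def pvPredsOf (blocks : List (String × List (String × List String))) (b : String) : List String :=
  (((blocks.lookup b).getD []).lookup "predecessors").getD []

def pvSuccsOf (blocks : List (String × List (String × List String))) (b : String) : List String :=
  (((blocks.lookup b).getD []).lookup "successors").getD []

-- branch_conds[name].get(tgt)
def pvCondInfo (branch_conds : List (String × List (String × String × Bool))) (name tgt : String) : Option (String × Bool) :=
  ((branch_conds.lookup name).getD []).lookup tgt

-- 'if pred not in result: result.add(pred); new_frontier.append(pred)'
def pvBfsInner (st : PySem.Set String × List String) (p : String) : PySem.Set String × List String :=
  if PySem.Set.contains st.1 p then st else (PySem.Set.add st.1 p, st.2 ++ [p])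

-- one round of the frontier loop body (result, new_frontier)
def pvBfsStep (blocks : List (String × List (String × List String))) (result : PySem.Set String) (frontier : List String) : PySem.Set String × List String :=
  frontier.foldl (fun st block => (pvPredsOf blocks block).foldl pvBfsInner st) (result, [])

-- 'for _ in range(max_depth): if not frontier: break; …'
def pvBfsA (blocks : List (String × List (String × List String))) : Nat → PySem.Set String → List String → PySem.Set String
  | 0, result, _ => result
  | Nat.succ n, result, frontier =>
      if frontier.isEmpty then result
      else
        let st := pvBfsStep blocks result frontier
        pvBfsA blocks n st.1 st.2

-- get_all_predecessors(start_blocks, max_depth=20)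
def pvGetAllPreds (blocks : List (String × List (String × List String))) (start : List String) : PySem.Set String :=
  pvBfsA blocks 20 (PySem.Set.ofList start) start

-- loop body of 'for block_name in branch_conds'
def pvScanBodyA (blocks : List (String × List (String × List String))) (branch_conds : List (String × List (String × String × Bool))) (preds_a preds_b : List String) (ra rb : PySem.Set String) (conds : List String) (name : String) : List String :=
  match pvSuccsOf blocks name with
  | [succ0, succ1] =>
    if (PySem.Set.contains rb succ0 || preds_b.contains succ0) &&
       ((PySem.Set.contains ra succ1 || preds_a.contains succ1) &&
        (!PySem.Set.contains rb succ1 && !preds_b.contains succ1)) then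
      match pvCondInfo branch_conds name succ0 with
      | some (cond_var, is_true) =>
          conds ++ [if is_true then cond_var else "(~" ++ cond_var ++ ")"]
      | none => conds
    else if (PySem.Set.contains rb succ1 || preds_b.contains succ1) &&
       ((PySem.Set.contains ra succ0 || preds_a.contains succ0) &&
        (!PySem.Set.contains rb succ0 && !preds_b.contains succ0)) then
      match pvCondInfo branch_conds name succ1 with
      | some (cond_var, is_true) =>
          conds ++ [if is_true then cond_var else "(~" ++ cond_var ++ ")"]
      | none => conds
    else conds
  | _ => conds

def find_condition_for_pred_groups_py (phi_block : String) (preds_a : List String) (preds_b : List String) (blocks : List (String × List (String × List String))) (branch_conds : List (String × List (String × String × Bool))) : Option String :=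
  let reaches_a := pvGetAllPreds blocks preds_a
  let reaches_b := pvGetAllPreds blocks preds_b
  let conditions := (branch_conds.map (·.1)).foldl (pvScanBodyA blocks branch_conds preds_a preds_b reaches_a reaches_b) []
  if conditions.isEmpty then none
  else
    let unique_conds := PySem.List.dedup conditions
    if unique_conds.length = 1 then some (unique_conds.headD "")
    else some ("(" ++ PySem.Str.join " & " unique_conds ++ ")")

-- ===== PORT B =====
-- one snapshot round: scan the blocks table, collecting the listed predecessors of members
def pvAltRound (blocks : List (String × List (String × List String))) (cur : PySem.Set String) : PySem.Set String :=
  blocks.foldl (fun nw e =>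
    if PySem.Set.contains cur e.1 then
      PySem.Set.union nw (PySem.Set.diff (PySem.Set.ofList ((e.2.lookup "predecessors").getD [])) cur)
    else nw) PySem.Set.empty

-- 'for _ in range(20): new = round(cur); if not new: break; cur |= new'
def pvAltClosure (blocks : List (String × List (String × List String))) : Nat → PySem.Set String → PySem.Set String
  | 0, cur => cur
  | Nat.succ n, cur =>
      let nw := pvAltRound blocks cur
      if nw.isEmpty then cur else pvAltClosure blocks n (PySem.Set.union cur nw)

-- ok(t, d)
def pvAltOk (ra rb : PySem.Set String) (t d : String) : Bool :=
  PySem.Set.contains rb t && PySem.Set.contains ra d && !PySem.Set.contains rb d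

-- pick(name, cmap): choose the target successor, then format its condition
def pvAltPick (blocks : List (String × List (String × List String))) (ra rb : PySem.Set String) (e : String × List (String × String × Bool)) : Option String :=
  match (((blocks.lookup e.1).getD []).lookup "successors").getD [] with
  | [s0, s1] =>
      let tgt : Option String :=
        if pvAltOk ra rb s0 s1 then some s0
        else if pvAltOk ra rb s1 s0 then some s1 else none
      match tgt.bind (fun t => e.2.lookup t) with
      | some (var, pos) => some (if pos then var else "(~" ++ var ++ ")")
      | none => none
  | _ => none

def find_condition_for_pred_groups_py_alt (phi_block : String) (preds_a : List String) (preds_b : List String) (blocks : List (String × List (String × List String))) (branch_conds : List (String × List (String × String × Bool))) : Option String :=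
  let ra := pvAltClosure blocks 20 (PySem.Set.ofList preds_a)
  let rb := pvAltClosure blocks 20 (PySem.Set.ofList preds_b)
  let conds := branch_conds.foldl (fun conds e =>
      match pvAltPick blocks ra rb e with
      | some c => if conds.contains c then conds else conds ++ [c]
      | none => conds) []
  if conds.isEmpty then none
  else if conds.length = 1 then some (conds.headD "")
  else some ("(" ++ PySem.Str.join " & " conds ++ ")")

-- ===== PRECONDITION & SPEC =====
-- The Python arguments `blocks` and `branch_conds` are dicts, whose keys are necessarily unique;
-- Pre_ excludes only association lists with duplicate keys in those two outer tables, an encoding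
-- no Python dict argument can produce, where first-match lookup and item iteration may disagree.
def Pre_find_condition_for_pred_groups_py (phi_block : String) (preds_a : List String) (preds_b : List String) (blocks : List (String × List (String × List String))) (branch_conds : List (String × List (String × String × Bool))) : Prop :=
  -- with unique block names, the first-match lookup A applies to the two outer tables
  -- (and through them to their "predecessors" / "successors" rows) agrees with B's
  -- direct iteration over the same items
  (blocks.map Prod.fst).Nodup ∧ (branch_conds.map Prod.fst).Nodup
instance (phi_block : String) (preds_a : List String) (preds_b : List String) (blocks : List (String × List (String × List String))) (branch_conds : List (String × List (String × String × Bool))) : Decidable (Pre_find_condition_for_pred_groups_py phi_block preds_a preds_b blocks branch_conds) := by unfold Pre_find_condition_for_pred_groups_py; infer_instance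

def pvWitness_find_condition_for_pred_groups_py : String × List String × List String × (List (String × List (String × List String))) × (List (String × List (String × String × Bool))) :=
  ("phi", ["a"], ["c"], [("d", [("predecessors", ["e"]), ("successors", ["c", "a"])])], [("d", [("c", ("v1", true))])])

def Spec_find_condition_for_pred_groups_py (phi_block : String) (preds_a : List String) (preds_b : List String) (blocks : List (String × List (String × List String))) (branch_conds : List (String × List (String × String × Bool))) (out : Option String) : Prop := out = find_condition_for_pred_groups_py_alt phi_block preds_a preds_b blocks branch_conds
instance (phi_block : String) (preds_a : List String) (preds_b : List String) (blocks : List (String × List (String × List String))) (branch_conds : List (String × List (String × String × Bool))) (out : Option String) : Decidable (Spec_find_condition_for_pred_groups_py phi_block preds_a preds_b blocks branch_conds out) := by unfold Spec_find_condition_for_pred_groups_py; infer_instance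

-- ===== CLAIM (what is proved, stated in full; the proofs are below) =====
def Claim_equal_find_condition_for_pred_groups_py : Prop := ∀ (phi_block : String) (preds_a : List String) (preds_b : List String) (blocks : List (String × List (String × List String))) (branch_conds : List (String × List (String × String × Bool))), Dom_find_condition_for_pred_groups_py phi_block preds_a preds_b blocks branch_conds → Pre_find_condition_for_pred_groups_py phi_block preds_a preds_b blocks branch_conds → Spec_find_condition_for_pred_groups_py phi_block preds_a preds_b blocks branch_conds (find_condition_for_pred_groups_py phi_block preds_a preds_b blocks branch_conds)

-- ===== LEMMAS AND PROOFS =====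

theorem pv_lookup_mem {α : Type} (l : List (String × α)) (k : String) (v : α)
    (h : l.lookup k = some v) : (k, v) ∈ l := by
  induction l with
  | nil => simp [List.lookup] at h
  | cons e t ih =>
    rw [List.lookup] at h
    by_cases hk : k == e.1
    · simp [hk] at h
      rw [beq_iff_eq] at hk; subst hk; rw [← h]; exact List.mem_cons_self
    · simp [hk] at h ⊢
      exact Or.inr (ih h)

theorem pv_mem_lookup {α : Type} (l : List (String × α)) (k : String) (v : α)
    (hnd : (l.map Prod.fst).Nodup) (h : (k, v) ∈ l) : l.lookup k = some v := by
  induction l with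
  | nil => simp at h
  | cons e t ih =>
    simp only [List.map_cons, List.nodup_cons] at hnd
    rcases List.mem_cons.mp h with h | h
    · rw [← h]; simp [List.lookup]
    · have hne : k ≠ e.1 := by rintro rfl; exact hnd.1 (List.mem_map.mpr ⟨_, h, rfl⟩)
      simp [List.lookup, beq_false_of_ne hne, ih hnd.2 h]

-- membership after one inner fold (over one block's predecessor list)
theorem pvBfsInner_mem (ps : List String) (r : PySem.Set String) (nf : List String) :
    (∀ x, x ∈ (ps.foldl pvBfsInner (r, nf)).1 ↔ x ∈ r ∨ x ∈ ps) ∧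
    (∀ x, x ∈ (ps.foldl pvBfsInner (r, nf)).2 ↔ x ∈ nf ∨ (x ∉ r ∧ x ∈ ps)) := by
  induction ps generalizing r nf with
  | nil => simp
  | cons p ps ih =>
    simp only [List.foldl_cons]
    by_cases hp : p ∈ r
    · have h1 : pvBfsInner (r, nf) p = (r, nf) := by
        simp only [pvBfsInner, (PySem.Set.contains_iff r p).mpr hp, if_true]
      rw [h1]
      refine ⟨fun x => ?_, fun x => ?_⟩
      · rw [(ih r nf).1 x]
        simp only [List.mem_cons]
        constructor
        · rintro (h | h)
          · exact Or.inl h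
          · exact Or.inr (Or.inr h)
        · rintro (h | rfl | h)
          · exact Or.inl h
          · exact Or.inl hp
          · exact Or.inr h
      · rw [(ih r nf).2 x]
        simp only [List.mem_cons]
        constructor
        · rintro (h | ⟨hnr, hps⟩)
          · exact Or.inl h
          · exact Or.inr ⟨hnr, Or.inr hps⟩
        · rintro (h | ⟨hnr, (rfl | hps)⟩)
          · exact Or.inl h
          · exact absurd hp hnr
          · exact Or.inr ⟨hnr, hps⟩
    · have hc : PySem.Set.contains r p = false := by
        cases hcc : PySem.Set.contains r p
        · rfl
        · exact absurd ((PySem.Set.contains_iff r p).mp hcc) hp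
      have h1 : pvBfsInner (r, nf) p = (r ++ [p], nf ++ [p]) := by
        simp only [pvBfsInner, hc, Bool.false_eq_true, if_false]
        rw [PySem.Set.add_of_not_mem hp]
      rw [h1]
      refine ⟨fun x => ?_, fun x => ?_⟩
      · rw [(ih (r ++ [p]) (nf ++ [p])).1 x]
        simp only [List.mem_append, List.mem_cons, List.not_mem_nil, or_false]
        constructor
        · rintro ((h | rfl) | h)
          · exact Or.inl h
          · exact Or.inr (Or.inl rfl)
          · exact Or.inr (Or.inr h)
        · rintro (h | rfl | h)
          · exact Or.inl (Or.inl h)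
          · exact Or.inl (Or.inr rfl)
          · exact Or.inr h
      · rw [(ih (r ++ [p]) (nf ++ [p])).2 x]
        simp only [List.mem_append, List.mem_cons, List.not_mem_nil, or_false]
        constructor
        · rintro ((h | rfl) | ⟨hnr, hps⟩)
          · exact Or.inl h
          · exact Or.inr ⟨hp, Or.inl rfl⟩
          · exact Or.inr ⟨fun hxr => hnr (Or.inl hxr), Or.inr hps⟩
        · rintro (h | ⟨hnr, (rfl | hps)⟩)
          · exact Or.inl (Or.inl h)
          · exact Or.inl (Or.inr rfl)
          · by_cases hxp : x = p
            · exact Or.inl (Or.inr hxp)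
            · exact Or.inr ⟨fun hor => hor.elim hnr hxp, hps⟩

-- membership after one full frontier round
theorem pvBfsStep_mem (blocks : List (String × List (String × List String))) (frontier : List String) (r : PySem.Set String) (nf : List String) :
    (∀ x, x ∈ (frontier.foldl (fun st block => (pvPredsOf blocks block).foldl pvBfsInner st) (r, nf)).1 ↔ x ∈ r ∨ ∃ b ∈ frontier, x ∈ pvPredsOf blocks b) ∧
    (∀ x, x ∈ (frontier.foldl (fun st block => (pvPredsOf blocks block).foldl pvBfsInner st) (r, nf)).2 ↔ x ∈ nf ∨ (x ∉ r ∧ ∃ b ∈ frontier, x ∈ pvPredsOf blocks b)) := by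
  induction frontier generalizing r nf with
  | nil => simp
  | cons b bs ih =>
    simp only [List.foldl_cons]
    have h1 := pvBfsInner_mem (pvPredsOf blocks b) r nf
    have h2 := ih ((pvPredsOf blocks b).foldl pvBfsInner (r, nf)).1 ((pvPredsOf blocks b).foldl pvBfsInner (r, nf)).2
    refine ⟨fun x => ?_, fun x => ?_⟩
    · rw [(h2.1 x : _)]
      simp only [List.exists_mem_cons_iff]
      rw [h1.1 x]; tauto
    · rw [(h2.2 x : _)]
      simp only [List.exists_mem_cons_iff]
      rw [h1.1 x, h1.2 x]
      constructor
      · rintro ((h | ⟨hr, hp⟩) | ⟨hx, hbs⟩)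
        · tauto
        · tauto
        · exact Or.inr ⟨fun h => hx (Or.inl h), Or.inr hbs⟩
      · rintro (h | ⟨hr, (hb | hbs)⟩)
        · tauto
        · tauto
        · by_cases hx : x ∈ pvPredsOf blocks b <;> tauto

-- membership in B's snapshot round (needs unique keys in blocks)
theorem pvAltRound_mem (blocks : List (String × List (String × List String)))
    (hnd : (blocks.map Prod.fst).Nodup) (cur : PySem.Set String) (y : String) :
    y ∈ pvAltRound blocks cur ↔ (∃ b ∈ cur, y ∈ pvPredsOf blocks b) ∧ y ∉ cur := by
  have haux : ∀ (l : List (String × List (String × List String))) (acc : PySem.Set String),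
      y ∈ l.foldl (fun nw e =>
        if PySem.Set.contains cur e.1 then
          PySem.Set.union nw (PySem.Set.diff (PySem.Set.ofList ((e.2.lookup "predecessors").getD [])) cur)
        else nw) acc
      ↔ y ∈ acc ∨ ∃ e ∈ l, e.1 ∈ cur ∧ y ∈ ((e.2.lookup "predecessors").getD []) ∧ y ∉ cur := by
    intro l
    induction l with
    | nil => simp
    | cons e t ih =>
      intro acc
      simp only [List.foldl_cons]
      by_cases he : e.1 ∈ cur
      · rw [if_pos (show PySem.Set.contains cur e.1 = true from (PySem.Set.contains_iff cur e.1).mpr he)]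
        rw [ih]
        rw [PySem.Set.mem_union, PySem.Set.mem_diff, PySem.Set.mem_ofList]
        simp only [List.exists_mem_cons_iff]
        tauto
      · have hc : PySem.Set.contains cur e.1 = false := by
          cases hcc : PySem.Set.contains cur e.1
          · rfl
          · exact absurd ((PySem.Set.contains_iff cur e.1).mp hcc) he
        rw [hc]
        simp only [Bool.false_eq_true, if_false]
        rw [ih]
        simp only [List.exists_mem_cons_iff]
        tauto
  rw [pvAltRound, haux]
  constructor
  · rintro (h | ⟨e, hel, hecur, hyp, hyc⟩)
    · simp [PySem.Set.empty] at h
    · refine ⟨⟨e.1, hecur, ?_⟩, hyc⟩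
      rw [pvPredsOf, pv_mem_lookup blocks e.1 e.2 hnd (by exact hel)]
      exact hyp
  · rintro ⟨⟨b, hb, hyp⟩, hyc⟩
    right
    rw [pvPredsOf] at hyp
    cases hlk : blocks.lookup b with
    | none => rw [hlk] at hyp; simp at hyp
    | some m =>
      rw [hlk] at hyp
      exact ⟨(b, m), pv_lookup_mem blocks b m hlk, hb, hyp, hyc⟩

-- a set with an empty round is a fixed point of B's closure
theorem pvAltClosure_closed (blocks : List (String × List (String × List String))) (n : Nat) (cur : PySem.Set String)
    (h : pvAltRound blocks cur = []) : pvAltClosure blocks n cur = cur := by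
  cases n with
  | zero => rfl
  | succ n => simp [pvAltClosure, h]

-- the two bounded reachability computations agree memberwise
theorem reach_mem_eq (blocks : List (String × List (String × List String)))
    (hnd : (blocks.map Prod.fst).Nodup) : ∀ (n : Nat) (result : PySem.Set String) (frontier : List String) (cur : PySem.Set String),
    (∀ x, x ∈ result ↔ x ∈ cur) →
    (∀ x ∈ frontier, x ∈ result) →
    (∀ x, x ∈ result → x ∉ frontier → ∀ p ∈ pvPredsOf blocks x, p ∈ result) →
    ∀ x, (x ∈ pvBfsA blocks n result frontier ↔ x ∈ pvAltClosure blocks n cur) := by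
  intro n
  induction n with
  | zero => intro result frontier cur h1 _ _ x; exact h1 x
  | succ n ih =>
    intro result frontier cur h1 h2 h3 x
    set nw := pvAltRound blocks cur with hnwdef
    have hmem_nw : ∀ y, y ∈ nw ↔ (∃ b ∈ cur, y ∈ pvPredsOf blocks b) ∧ y ∉ cur :=
      pvAltRound_mem blocks hnd cur
    by_cases hf : frontier = []
    · subst hf
      have hclosed : nw = [] := by
        rw [List.eq_nil_iff_forall_not_mem]
        intro y hy
        rcases (hmem_nw y).1 hy with ⟨⟨b, hb, hyb⟩, hyc⟩
        exact hyc ((h1 y).1 (h3 b ((h1 b).2 hb) (by simp) y hyb))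
      rw [pvAltClosure_closed blocks (n + 1) cur hclosed]
      simp only [pvBfsA, List.isEmpty_nil, if_true]
      exact h1 x
    · have hfe : frontier.isEmpty = false := by
        simp [hf]
      have hstep := pvBfsStep_mem blocks frontier result []
      have hst1 : ∀ y, y ∈ (pvBfsStep blocks result frontier).1 ↔ y ∈ result ∨ ∃ b ∈ frontier, y ∈ pvPredsOf blocks b := by
        intro y
        simp only [pvBfsStep]
        exact hstep.1 y
      have hst2 : ∀ y, y ∈ (pvBfsStep blocks result frontier).2 ↔ y ∉ result ∧ ∃ b ∈ frontier, y ∈ pvPredsOf blocks b := by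
        intro y
        simp only [pvBfsStep]
        rw [hstep.2 y]
        simp
      have hSfr : ∀ y, (∃ b ∈ frontier, y ∈ pvPredsOf blocks b) → ∃ b ∈ cur, y ∈ pvPredsOf blocks b := by
        rintro y ⟨b, hb, hyb⟩; exact ⟨b, (h1 b).1 (h2 b hb), hyb⟩
      have hA : pvBfsA blocks (n + 1) result frontier
          = pvBfsA blocks n (pvBfsStep blocks result frontier).1 (pvBfsStep blocks result frontier).2 := by
        simp only [pvBfsA, hfe, Bool.false_eq_true, if_false]
      have hinv2 : ∀ y ∈ (pvBfsStep blocks result frontier).2, y ∈ (pvBfsStep blocks result frontier).1 := by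
        intro y hy
        rw [hst1 y]
        exact Or.inr ((hst2 y).1 hy).2
      have hinv3 : ∀ y, y ∈ (pvBfsStep blocks result frontier).1 → y ∉ (pvBfsStep blocks result frontier).2 →
          ∀ p ∈ pvPredsOf blocks y, p ∈ (pvBfsStep blocks result frontier).1 := by
        intro y hy hynf p hp
        rw [hst1 p]
        rcases (hst1 y).1 hy with hyr | hyf
        · by_cases hyfr : y ∈ frontier
          · exact Or.inr ⟨y, hyfr, hp⟩
          · exact Or.inl (h3 y hyr hyfr p hp)
        · by_cases hyr : y ∈ result
          · by_cases hyfr : y ∈ frontier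
            · exact Or.inr ⟨y, hyfr, hp⟩
            · exact Or.inl (h3 y hyr hyfr p hp)
          · exact absurd ((hst2 y).2 ⟨hyr, hyf⟩) hynf
      rw [hA]
      by_cases hne : nw = []
      · have hclosed2 : ∀ y, (∃ b ∈ cur, y ∈ pvPredsOf blocks b) → y ∈ cur := by
          intro y hy
          by_contra hyc
          exact (List.eq_nil_iff_forall_not_mem.mp hne y) ((hmem_nw y).2 ⟨hy, hyc⟩)
        rw [pvAltClosure_closed blocks (n + 1) cur hne]
        have h1' : ∀ y, y ∈ (pvBfsStep blocks result frontier).1 ↔ y ∈ cur := by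
          intro y
          rw [hst1 y]
          constructor
          · rintro (h | h)
            · exact (h1 y).1 h
            · exact hclosed2 y (hSfr y h)
          · intro h
            exact Or.inl ((h1 y).2 h)
        rw [ih (pvBfsStep blocks result frontier).1 (pvBfsStep blocks result frontier).2 cur h1' hinv2 hinv3 x]
        rw [pvAltClosure_closed blocks n cur hne]
      · have hnee : nw.isEmpty = false := by simp [hne]
        have hBstep : pvAltClosure blocks (n + 1) cur = pvAltClosure blocks n (PySem.Set.union cur nw) := by
          conv_lhs => rw [pvAltClosure]
          rw [← hnwdef]
          simp only [hnee, Bool.false_eq_true, if_false]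
        rw [hBstep]
        have h1' : ∀ y, y ∈ (pvBfsStep blocks result frontier).1 ↔ y ∈ PySem.Set.union cur nw := by
          intro y
          rw [hst1 y, PySem.Set.mem_union, hmem_nw y]
          constructor
          · rintro (h | h)
            · exact Or.inl ((h1 y).1 h)
            · by_cases hyc : y ∈ cur
              · exact Or.inl hyc
              · exact Or.inr ⟨hSfr y h, hyc⟩
          · rintro (h | ⟨⟨b, hb, hyb⟩, hyc⟩)
            · exact Or.inl ((h1 y).2 h)
            · by_cases hbf : b ∈ frontier
              · exact Or.inr ⟨b, hbf, hyb⟩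
              · exact Or.inl (h3 b ((h1 b).2 hb) hbf y hyb)
        exact ih (pvBfsStep blocks result frontier).1 (pvBfsStep blocks result frontier).2 (PySem.Set.union cur nw) h1' hinv2 hinv3 x

-- A's and B's bounded reachability sets agree memberwise
theorem reaches_mem_eq (blocks : List (String × List (String × List String)))
    (hnd : (blocks.map Prod.fst).Nodup) (start : List String) :
    ∀ x, x ∈ pvGetAllPreds blocks start ↔ x ∈ pvAltClosure blocks 20 (PySem.Set.ofList start) := by
  intro x
  apply reach_mem_eq blocks hnd
  · intro y; rfl
  · intro y hy; rw [PySem.Set.mem_ofList]; exact hy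
  · intro y hy hyn
    rw [PySem.Set.mem_ofList] at hy
    exact absurd hy hyn

-- B's closure only grows
theorem pvAltClosure_subset (blocks : List (String × List (String × List String))) :
    ∀ (n : Nat) (cur : PySem.Set String) (x : String), x ∈ cur → x ∈ pvAltClosure blocks n cur := by
  intro n
  induction n with
  | zero => intro cur x hx; exact hx
  | succ n ih =>
    intro cur x hx
    rw [pvAltClosure]
    split
    · exact hx
    · exact ih (PySem.Set.union cur (pvAltRound blocks cur)) x ((PySem.Set.mem_union _ _ _).mpr (Or.inl hx))

-- 'x in reaches_s or x in s' (A) is 'x in closure(s)' (B)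
theorem contains_absorb (blocks : List (String × List (String × List String)))
    (hnd : (blocks.map Prod.fst).Nodup) (start : List String) (x : String) :
    (PySem.Set.contains (pvGetAllPreds blocks start) x || start.contains x)
      = PySem.Set.contains (pvAltClosure blocks 20 (PySem.Set.ofList start)) x := by
  rw [Bool.eq_iff_iff]
  simp only [Bool.or_eq_true, PySem.Set.contains_iff, List.contains_iff_mem]
  rw [reaches_mem_eq blocks hnd start x]
  constructor
  · rintro (h | h)
    · exact h
    · exact pvAltClosure_subset blocks 20 (PySem.Set.ofList start) x ((PySem.Set.mem_ofList _ _).mpr h)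
  · exact Or.inl

-- A's composite decision test is B's ok(t, d)
theorem ok_eq (blocks : List (String × List (String × List String)))
    (hnd : (blocks.map Prod.fst).Nodup) (preds_a preds_b : List String) (t d : String) :
    ((PySem.Set.contains (pvGetAllPreds blocks preds_b) t || preds_b.contains t) &&
     ((PySem.Set.contains (pvGetAllPreds blocks preds_a) d || preds_a.contains d) &&
      (!PySem.Set.contains (pvGetAllPreds blocks preds_b) d && !preds_b.contains d)))
    = pvAltOk (pvAltClosure blocks 20 (PySem.Set.ofList preds_a)) (pvAltClosure blocks 20 (PySem.Set.ofList preds_b)) t d := by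
  rw [← Bool.not_or, contains_absorb blocks hnd preds_b t, contains_absorb blocks hnd preds_a d,
      contains_absorb blocks hnd preds_b d, pvAltOk, Bool.and_assoc]

-- A's loop body appends exactly B's pick for the entry (unique keys in branch_conds)
theorem scan_body_eq (blocks : List (String × List (String × List String)))
    (hnd : (blocks.map Prod.fst).Nodup)
    (branch_conds : List (String × List (String × String × Bool)))
    (hndc : (branch_conds.map Prod.fst).Nodup)
    (preds_a preds_b : List String) (conds : List String)
    (e : String × List (String × String × Bool)) (he : e ∈ branch_conds) :
    pvScanBodyA blocks branch_conds preds_a preds_b (pvGetAllPreds blocks preds_a) (pvGetAllPreds blocks preds_b) conds e.1 =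
      conds ++ (pvAltPick blocks (pvAltClosure blocks 20 (PySem.Set.ofList preds_a)) (pvAltClosure blocks 20 (PySem.Set.ofList preds_b)) e).toList := by
  have hlk : branch_conds.lookup e.1 = some e.2 := pv_mem_lookup branch_conds e.1 e.2 hndc (by cases e; exact he)
  have hinfo : ∀ tgt, pvCondInfo branch_conds e.1 tgt = e.2.lookup tgt := by
    intro tgt; rw [pvCondInfo, hlk]; rfl
  unfold pvScanBodyA pvAltPick
  have hsucc : (((blocks.lookup e.1).getD []).lookup "successors").getD [] = pvSuccsOf blocks e.1 := rfl
  rw [hsucc]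
  cases hs : pvSuccsOf blocks e.1 with
  | nil => simp
  | cons s0 tl =>
    cases tl with
    | nil => simp
    | cons s1 tl2 =>
      cases tl2 with
      | cons _ _ => simp
      | nil =>
        dsimp only
        rw [ok_eq blocks hnd preds_a preds_b s0 s1, ok_eq blocks hnd preds_a preds_b s1 s0]
        by_cases h01 : pvAltOk (pvAltClosure blocks 20 (PySem.Set.ofList preds_a)) (pvAltClosure blocks 20 (PySem.Set.ofList preds_b)) s0 s1
        · simp only [h01, if_true, hinfo, Option.bind_some]
          cases hi : e.2.lookup s0 with
          | none => simp
          | some cv => cases cv; simp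
        · simp only [h01, Bool.false_eq_true, if_false]
          by_cases h10 : pvAltOk (pvAltClosure blocks 20 (PySem.Set.ofList preds_a)) (pvAltClosure blocks 20 (PySem.Set.ofList preds_b)) s1 s0
          · simp only [h10, if_true, hinfo, Option.bind_some]
            cases hi : e.2.lookup s1 with
            | none => simp
            | some cv => cases cv; simp
          · simp [h10]

-- inline first-occurrence dedup of the picked options is PySem.Set.add over the flattened list
theorem foldl_optadd_eq {α : Type} (g : α → Option String) (l : List α) :
    ∀ (acc : List String),
    l.foldl (fun conds e => match g e with
      | some c => if conds.contains c then conds else conds ++ [c]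
      | none => conds) acc
    = (l.flatMap (fun e => (g e).toList)).foldl PySem.Set.add acc := by
  induction l with
  | nil => intro acc; simp
  | cons k l ih =>
    intro acc
    simp only [List.foldl_cons, List.flatMap_cons, List.foldl_append]
    cases hk : g k with
    | none => simpa using ih acc
    | some c =>
      simp only [Option.toList_some, List.foldl_cons, List.foldl_nil]
      rw [ih]
      rfl

theorem dedup_isEmpty_eq (l : List String) : l.isEmpty = (PySem.List.dedup l).isEmpty := by
  cases l with
  | nil => rfl
  | cons a t =>
    have : a ∈ PySem.List.dedup (a :: t) := by
      rw [PySem.List.mem_dedup]; simp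
    cases h : PySem.List.dedup (a :: t) with
    | nil => rw [h] at this; simp at this
    | cons b s => simp

-- ===== VERDICT (by name: the statement is the Claim_ definition above) =====
theorem find_condition_for_pred_groups_py_spec : Claim_equal_find_condition_for_pred_groups_py := by
  intro phi_block preds_a preds_b blocks branch_conds _ hpre
  obtain ⟨hnd, hndc⟩ := hpre
  unfold Spec_find_condition_for_pred_groups_py
  unfold find_condition_for_pred_groups_py find_condition_for_pred_groups_py_alt
  set ra := pvAltClosure blocks 20 (PySem.Set.ofList preds_a) with hra
  set rb := pvAltClosure blocks 20 (PySem.Set.ofList preds_b) with hrb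
  set G := fun e => pvAltPick blocks ra rb e with hG
  have hfold : (branch_conds.map (·.1)).foldl (pvScanBodyA blocks branch_conds preds_a preds_b (pvGetAllPreds blocks preds_a) (pvGetAllPreds blocks preds_b)) []
      = branch_conds.flatMap (fun e => (G e).toList) := by
    rw [List.foldl_map]
    rw [PySem.List.foldl_congr_mem branch_conds _ (fun conds e => conds ++ (G e).toList) []
        (fun conds e hme => scan_body_eq blocks hnd branch_conds hndc preds_a preds_b conds e hme)]
    rw [PySem.List.foldl_append_eq_flatMap]
    simp
  have haltfold : branch_conds.foldl (fun conds e =>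
        match G e with
        | some c => if conds.contains c then conds else conds ++ [c]
        | none => conds) []
      = PySem.List.dedup (branch_conds.flatMap (fun e => (G e).toList)) := by
    rw [foldl_optadd_eq G branch_conds []]
    rw [PySem.List.dedup_eq_ofList, PySem.Set.ofList_eq_foldl]
  simp only []
  rw [hfold, haltfold]
  rw [← dedup_isEmpty_eq]
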